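-- pv_equiv track=rewrite | github.com/bz866/Data-Structures-and-Algorithms | SimilarStrings.py | similarStrings
-- ===== SOURCE A (Python) =====
-- def similarStrings(strA, strB):
--
-- 	if not strA or not strB:
-- 		return False
--
-- 	charCntMapA = dict()
-- 	charCntMapB = dict()
-- 	keysUnionSet = set()
-- 	diff = 0
--
-- 	for c in strA:
-- 		cnt = charCntMapA.setdefault(c, 0) + 1
-- 		charCntMapA[c] = cnt
-- 		keysUnionSet.add(c)
--
-- 	for c in strB:
-- 		cnt = charCntMapB.setdefault(c, 0) + 1
-- 		charCntMapB[c] = cnt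
-- 		keysUnionSet.add(c)
--
-- 	for key in keysUnionSet:
-- 		diff += abs( charCntMapA.setdefault(key, 0) - charCntMapB.setdefault(key, 0) )
-- 		if diff >= 3:
-- 			return False
--
-- 	return True
-- ===== SOURCE B (Python) =====
-- def similarStrings(strA, strB):
--     if not strA or not strB:
--         return False
--     # Multiset matching: greedily pair each char of strA with an unused char of strB.
--     # The unpaired leftovers on both sides are exactly the symmetric multiset
--     # difference, whose size equals the sum of absolute per-char count differences.
--     rest = list(strB)
--     common = 0
--     for c in strA:
--         if c in rest:
--             rest.remove(c)
--             common += 1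
--     return len(strA) + len(strB) - 2 * common < 3
-- ===== Notes on version B (the rewrite author's own statement) =====
-- stated objective: alternative
-- what changed: B replaces A's frequency dictionaries entirely: it greedily pairs each character of strA with an unused occurrence in a mutable copy of strB (multiset matching by removal) and tests len(strA)+len(strB)-2*matched < 3, using the identity sum|cA-cB| = |A|+|B|-2*|A∩B| on multisets.
import Mathlib
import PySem

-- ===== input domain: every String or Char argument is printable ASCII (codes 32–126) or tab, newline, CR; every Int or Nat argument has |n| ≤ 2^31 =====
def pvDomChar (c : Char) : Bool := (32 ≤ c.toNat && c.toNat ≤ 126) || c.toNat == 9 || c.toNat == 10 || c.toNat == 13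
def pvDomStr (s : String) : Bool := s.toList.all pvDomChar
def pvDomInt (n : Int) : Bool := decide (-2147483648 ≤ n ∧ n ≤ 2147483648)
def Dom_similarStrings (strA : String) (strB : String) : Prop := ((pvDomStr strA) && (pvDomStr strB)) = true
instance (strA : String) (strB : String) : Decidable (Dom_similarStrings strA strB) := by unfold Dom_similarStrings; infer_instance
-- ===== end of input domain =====

-- B replaces A's frequency dictionaries by greedy multiset matching: each char of strA is
-- paired with an unused occurrence in a copy of strB, then len(strA)+len(strB)-2*matched < 3
-- (objective: alternative algorithm, same result).


-- ===== PORT A =====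
-- the 'for key in keysUnionSet' loop with its early 'return False' (the set's iteration
-- order cannot change the Boolean result: diff only grows); setdefault(key, 0) is read
-- here only through its returned value, i.e. getD key 0 (the 0-inserts it performs are
-- never observed afterwards)
def similarStringsKeyLoop (mA mB : PySem.Dict Char Int) : List Char → Int → Bool
  | [], _ => true
  | k :: rest, diff =>
    let diff' := diff + |mA.getD k 0 - mB.getD k 0|
    if 3 ≤ diff' then false else similarStringsKeyLoop mA mB rest diff'

def similarStrings (strA : String) (strB : String) : Bool :=
  if strA.toList.isEmpty || strB.toList.isEmpty then false
  else
    -- first loop: build charCntMapA and add each char to keysUnionSet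
    let stA := strA.toList.foldl
      (fun (st : PySem.Dict Char Int × PySem.Set Char) c =>
        (st.1.insert c (st.1.getD c 0 + 1), st.2.add c)) (PySem.Dict.empty, PySem.Set.empty)
    -- second loop: build charCntMapB, keep extending keysUnionSet
    let stB := strB.toList.foldl
      (fun (st : PySem.Dict Char Int × PySem.Set Char) c =>
        (st.1.insert c (st.1.getD c 0 + 1), st.2.add c)) (PySem.Dict.empty, stA.2)
    similarStringsKeyLoop stA.1 stB.1 stB.2 0

-- ===== PORT B =====
-- B's 'for c in strA' loop over the mutable copy rest = list(strB); 'rest.remove(c)' is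
-- guarded by 'c in rest', so it is exactly List.erase (first occurrence)
def simMatchLoop : List Char → List Char → Int → List Char × Int
  | [], rest, cm => (rest, cm)
  | c :: l, rest, cm =>
    if rest.contains c then simMatchLoop l (rest.erase c) (cm + 1)
    else simMatchLoop l rest cm

def similarStrings_alt (strA : String) (strB : String) : Bool :=
  if strA.toList.isEmpty || strB.toList.isEmpty then false
  else
    let res := simMatchLoop strA.toList strB.toList 0
    decide ((strA.toList.length : Int) + strB.toList.length - 2 * res.2 < 3)

-- ===== PRECONDITION & SPEC =====
def Spec_similarStrings (strA : String) (strB : String) (out : Bool) : Prop := out = similarStrings_alt strA strB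
instance (strA : String) (strB : String) (out : Bool) : Decidable (Spec_similarStrings strA strB out) := by unfold Spec_similarStrings; infer_instance

-- ===== CLAIM (what is proved, stated in full; the proofs are below) =====
def Claim_equal_similarStrings : Prop := ∀ (strA : String) (strB : String), Dom_similarStrings strA strB → Spec_similarStrings strA strB (similarStrings strA strB)

-- ===== LEMMAS AND PROOFS =====

-- A's key loop with early exit decides "partial + total remaining sum < 3" (entered with diff < 3)
theorem keyLoop_eq_decide (mA mB : PySem.Dict Char Int) :
    ∀ (ks : List Char) (diff : Int), diff < 3 →
      similarStringsKeyLoop mA mB ks diff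
        = decide (diff + ((ks.map (fun k => |mA.getD k 0 - mB.getD k 0|)).sum) < 3) := by
  intro ks
  induction ks with
  | nil => intro diff hd; simp [similarStringsKeyLoop, hd]
  | cons k rest ih =>
    intro diff hd
    have hsum : 0 ≤ (rest.map (fun k => |mA.getD k 0 - mB.getD k 0|)).sum := by
      apply List.sum_nonneg
      intro x hx
      obtain ⟨k', _, rfl⟩ := List.mem_map.mp hx
      exact abs_nonneg _
    simp only [similarStringsKeyLoop, List.map_cons, List.sum_cons]
    split_ifs with h
    · symm
      simp only [decide_eq_false_iff_not, not_lt]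
      omega
    · rw [ih _ (by omega)]
      congr 1
      simp only [eq_iff_iff]
      constructor <;> (intro; omega)

-- B's matching loop counts the multiset intersection of the two lists
theorem simMatchLoop_snd : ∀ (l r : List Char) (cm : Int),
    (simMatchLoop l r cm).2 = cm + ((l : Multiset Char) ∩ (r : Multiset Char)).card := by
  intro l
  induction l with
  | nil => intro r cm; simp [simMatchLoop]
  | cons c l ih =>
    intro r cm
    by_cases h : c ∈ r
    · rw [simMatchLoop, if_pos (by simpa using h), ih]
      rw [show ((c :: l : List Char) : Multiset Char) = c ::ₘ (l : Multiset Char) from rfl,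
        Multiset.cons_inter_of_pos _ (by simpa using h), ← Multiset.coe_erase,
        Multiset.card_cons]
      push_cast
      ring
    · rw [simMatchLoop, if_neg (by simpa using h), ih]
      rw [show ((c :: l : List Char) : Multiset Char) = c ::ₘ (l : Multiset Char) from rfl,
        Multiset.cons_inter_of_neg _ (by simpa using h)]

-- summing a multiset's counts over any finset containing its support gives its size
theorem sum_count_superset (m : Multiset Char) (F : Finset Char) (h : ∀ a ∈ m, a ∈ F) :
    (∑ a ∈ F, m.count a) = Multiset.card m := by
  rw [← Multiset.toFinset_sum_count_eq m]
  exact (Finset.sum_subset (fun a ha => h a (Multiset.mem_toFinset.mp ha))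
    (fun a _ ha => by
      simpa [Multiset.count_eq_zero] using fun hm => ha (Multiset.mem_toFinset.mpr hm))).symm

theorem abs_sub_cast (a b : Nat) : |(a : Int) - b| = (a : Int) + b - 2 * (min a b : Nat) := by
  rcases le_total a b with h | h
  · rw [min_eq_left h, abs_of_nonpos (by omega)]; omega
  · rw [min_eq_right h, abs_of_nonneg (by omega)]; omega

-- the per-key sum of absolute count differences over set(A+B) equals |A|+|B|-2|A ∩ B|
theorem sum_abs_counts (A B : List Char) :
    ((PySem.Set.ofList (A ++ B)).map
        (fun k => |(A.count k : Int) - (B.count k : Int)|)).sum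
      = (A.length : Int) + B.length - 2 * ((A : Multiset Char) ∩ (B : Multiset Char)).card := by
  have hnd : ((PySem.Set.ofList (A ++ B) : List Char) : Multiset Char).Nodup := by
    exact_mod_cast PySem.Set.nodup_ofList (A ++ B)
  set F : Finset Char := ⟨(PySem.Set.ofList (A ++ B) : List Char), hnd⟩ with hF
  have hmemF : ∀ a : Char, a ∈ A ++ B → a ∈ F := by
    intro a ha
    simp only [hF, Finset.mem_mk, Multiset.mem_coe]
    exact (PySem.Set.mem_ofList _ _).mpr ha
  have hlist : ((PySem.Set.ofList (A ++ B)).map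
      (fun k => |(A.count k : Int) - (B.count k : Int)|)).sum
      = ∑ a ∈ F, |(A.count a : Int) - (B.count a : Int)| := by
    simp [hF, Finset.sum, Multiset.map_coe, Multiset.sum_coe]
  rw [hlist]
  have hA : (∑ a ∈ F, (A : Multiset Char).count a) = Multiset.card (A : Multiset Char) :=
    sum_count_superset _ _ (fun a ha => hmemF a (by
      simp only [List.mem_append]; exact Or.inl (by simpa using ha)))
  have hB : (∑ a ∈ F, (B : Multiset Char).count a) = Multiset.card (B : Multiset Char) :=
    sum_count_superset _ _ (fun a ha => hmemF a (by
      simp only [List.mem_append]; exact Or.inr (by simpa using ha)))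
  have hI : (∑ a ∈ F, ((A : Multiset Char) ∩ (B : Multiset Char)).count a)
      = Multiset.card ((A : Multiset Char) ∩ (B : Multiset Char)) :=
    sum_count_superset _ _ (fun a ha => hmemF a (by
      simp only [List.mem_append]
      exact Or.inl (by simpa using (Multiset.mem_inter.mp ha).1)))
  calc (∑ a ∈ F, |(A.count a : Int) - (B.count a : Int)|)
      = ∑ a ∈ F, (((A : Multiset Char).count a : Int) + ((B : Multiset Char).count a : Int)
          - 2 * (((A : Multiset Char) ∩ (B : Multiset Char)).count a : Int)) := by
        apply Finset.sum_congr rfl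
        intro a _
        rw [Multiset.count_inter]
        simp only [Multiset.coe_count]
        exact abs_sub_cast (A.count a) (B.count a)
    _ = (A.length : Int) + B.length
          - 2 * ((A : Multiset Char) ∩ (B : Multiset Char)).card := by
        rw [Finset.sum_sub_distrib, Finset.sum_add_distrib, ← Finset.mul_sum]
        push_cast [← Nat.cast_sum]
        rw [hA, hB, hI]
        simp

theorem similarStrings_spec_aux (strA strB : String) :
    similarStrings strA strB = similarStrings_alt strA strB := by
  simp only [similarStrings, similarStrings_alt]
  split_ifs with h
  · rfl
  · -- split A's paired fold into two independent folds
    rw [PySem.List.foldl_prod_mk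
        (f := fun (d : PySem.Dict Char Int) c => d.insert c (d.getD c 0 + 1))
        (g := fun (s : PySem.Set Char) c => PySem.Set.add s c),
      PySem.List.foldl_prod_mk
        (f := fun (d : PySem.Dict Char Int) c => d.insert c (d.getD c 0 + 1))
        (g := fun (s : PySem.Set Char) c => PySem.Set.add s c)]
    simp only [PySem.Dict.foldl_insert_getD_add_one_eq_counter]
    have hks : strB.toList.foldl (fun (s : PySem.Set Char) c => PySem.Set.add s c)
        (strA.toList.foldl (fun (s : PySem.Set Char) c => PySem.Set.add s c) PySem.Set.empty)
        = PySem.Set.ofList (strA.toList ++ strB.toList) := by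
      rw [PySem.Set.ofList_append]; rfl
    rw [hks, keyLoop_eq_decide _ _ _ 0 (by norm_num)]
    have hmap : (List.map (fun k => |(PySem.Dict.counter strA.toList).getD k 0
          - (PySem.Dict.counter strB.toList).getD k 0|)
          (PySem.Set.ofList (strA.toList ++ strB.toList)))
        = (PySem.Set.ofList (strA.toList ++ strB.toList)).map
          (fun k => |(strA.toList.count k : Int) - (strB.toList.count k : Int)|) := by
      apply List.map_congr_left
      intro k _
      simp [PySem.Dict.getD_counter]
    rw [hmap, sum_abs_counts, simMatchLoop_snd]
    simp only [zero_add]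

-- ===== VERDICT (by name: the statement is the Claim_ definition above) =====
theorem similarStrings_spec : Claim_equal_similarStrings := by
  intro strA strB _
  unfold Spec_similarStrings
  exact similarStrings_spec_aux strA strB
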